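-- pv_equiv track=rewrite | github.com/calico-team/calico-sp25 | miku/submissions/accepted/miku_nsquared.py | solve
-- ===== SOURCE A (Python) =====
-- def solve(S):
--     count = 0
--     for i in range(0, len(S)):
--         if (S[i] == 'o' and i + 1 <= len(S)):
--             w = False
--             for j in range(i + 1, len(S)):
--                 if (S[j] == 'w'):
--                     w = True
--                 if (w and S[j] == 'o'):
--                     count += 1
--
--     for i in range(0, len(S)):
--         if (S[i] == 'u' and i + 1 <= len(S)):
--             w = False
--             for j in range(i + 1, len(S)):
--                 if (S[j] == 'w'):
--                     w = True
--                 if (w and S[j] == 'u'):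
--                     count += 1
--
--     return count
-- ===== SOURCE B (Python) =====
-- def solve(S):
--     # One left-to-right pass: when a 'w' appears, every 'o'/'u' seen so far becomes
--     # an eligible left endpoint; each later 'o'/'u' closes that many pairs.
--     o_total = u_total = 0
--     o_before_w = u_before_w = 0
--     count = 0
--     for ch in S:
--         if ch == 'w':
--             o_before_w = o_total
--             u_before_w = u_total
--         elif ch == 'o':
--             count += o_before_w
--             o_total += 1
--         elif ch == 'u':
--             count += u_before_w
--             u_total += 1
--     return count
-- ===== Notes on version B (the rewrite author's own statement) =====
-- stated objective: faster
-- what changed: Replaced the two quadratic scans (for each candidate left-endpoint character, rescan the entire suffix counting matches once the separator has been seen) by a single linear left-to-right pass that maintains running totals plus the totals snapshotted at the most recent separator and adds the snapshot at each later matching character.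
import Mathlib
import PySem

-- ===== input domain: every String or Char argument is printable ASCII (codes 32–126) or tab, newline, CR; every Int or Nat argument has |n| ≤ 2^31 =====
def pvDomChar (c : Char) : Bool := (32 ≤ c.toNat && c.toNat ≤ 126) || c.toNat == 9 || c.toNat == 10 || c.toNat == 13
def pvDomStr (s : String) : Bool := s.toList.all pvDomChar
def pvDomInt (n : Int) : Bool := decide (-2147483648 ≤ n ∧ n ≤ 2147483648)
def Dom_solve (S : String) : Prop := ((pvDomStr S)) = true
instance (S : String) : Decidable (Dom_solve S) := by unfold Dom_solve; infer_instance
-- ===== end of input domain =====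

-- B replaces A's two quadratic forward scans by a single linear left-to-right pass (objective: faster).

-- ===== PORT A =====
-- A's inner-loop body: update the 'w' flag, then count a match seen after a 'w'.
-- Indices fed to pyGetD are always in range (i in range(len(S)), j in range(i+1, len(S))), so Python never raises.
def innerStepA (l : List Char) (tg : Char) (st : Bool × Int) (j : Int) : Bool × Int :=
  let w := if PySem.List.pyGetD l j ' ' = 'w' then true else st.1
  let c := if w ∧ PySem.List.pyGetD l j ' ' = tg then st.2 + 1 else st.2
  (w, c)

-- A's outer-loop body (tg = 'o' for the first loop, 'u' for the second; the two loops are textually identical).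
def outerStepA (l : List Char) (tg : Char) (count : Int) (i : Int) : Int :=
  if PySem.List.pyGetD l i ' ' = tg ∧ i + 1 ≤ (l.length : Int) then
    ((PySem.List.pyRange (i + 1) (l.length : Int) 1).foldl
      (innerStepA l tg) (false, count)).2
  else count

def aLoop (l : List Char) (tg : Char) (count0 : Int) : Int :=
  (PySem.List.pyRange 0 (l.length : Int) 1).foldl (outerStepA l tg) count0

def solve (S : String) : Int :=
  aLoop S.toList 'u' (aLoop S.toList 'o' 0)

-- ===== PORT B =====
-- state = (o_total, u_total, o_before_w, u_before_w, count)
def stepB (st : Int × Int × Int × Int × Int) (ch : Char) : Int × Int × Int × Int × Int :=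
  if ch = 'w' then (st.1, st.2.1, st.1, st.2.1, st.2.2.2.2)
  else if ch = 'o' then (st.1 + 1, st.2.1, st.2.2.1, st.2.2.2.1, st.2.2.2.2 + st.2.2.1)
  else if ch = 'u' then (st.1, st.2.1 + 1, st.2.2.1, st.2.2.2.1, st.2.2.2.2 + st.2.2.2.1)
  else st

def solve_alt (S : String) : Int :=
  (S.toList.foldl stepB (0, 0, 0, 0, 0)).2.2.2.2

-- ===== PRECONDITION & SPEC =====
def Spec_solve (S : String) (out : Int) : Prop := out = solve_alt S
instance (S : String) (out : Int) : Decidable (Spec_solve S out) := by unfold Spec_solve; infer_instance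

-- ===== CLAIM (what is proved, stated in full; the proofs are below) =====
def Claim_equal_solve : Prop := ∀ (S : String), Dom_solve S → Spec_solve S (solve S)

-- ===== LEMMAS AND PROOFS =====

-- Structural counterpart of A's inner loop, starting with flag w.
def innerB (tg : Char) : Bool → List Char → Int
  | _, [] => 0
  | w, x :: t =>
    let w' := if x = 'w' then true else w
    (if w' ∧ x = tg then 1 else 0) + innerB tg w' t

-- Structural counterpart of one of A's outer loops.
def outerF (tg : Char) : List Char → Int
  | [] => 0
  | x :: t => (if x = tg then innerB tg false t else 0) + outerF tg t

-- Number of tg's that have a 'w' somewhere after them.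
def bw (tg : Char) : List Char → Int
  | [] => 0
  | x :: t => (if x = tg ∧ 'w' ∈ t then 1 else 0) + bw tg t

def tcnt (tg : Char) (l : List Char) : Int := l.countP (· = tg)

lemma inner_bridge (l : List Char) (tg : Char) (k : Nat) (w : Bool) (acc : Int) :
    (PySem.List.pyRange (k : Int) (l.length : Int) 1).foldl (innerStepA l tg) (w, acc)
    = ((w || decide ('w' ∈ l.drop k)), acc + innerB tg w (l.drop k)) := by
  rcases Nat.lt_or_ge k l.length with hk | hk
  · have hki : (k : Int) < (l.length : Int) := by exact_mod_cast hk
    have hcast : (k : Int) + 1 = ((k + 1 : Nat) : Int) := by push_cast; rfl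
    rw [PySem.List.pyRange_one_cons hki, List.foldl_cons, hcast]
    have hget : PySem.List.pyGetD l (k : Int) ' ' = l[k] := by
      simp [PySem.List.pyGetD_natCast, List.getD_eq_getElem?_getD, List.getElem?_eq_getElem hk]
    have hdrop : l.drop k = l[k] :: l.drop (k + 1) := by
      rw [List.drop_eq_getElem_cons hk]
    have hrec := inner_bridge l tg (k + 1)
    simp only [innerStepA, hget]
    rw [hrec, hdrop]
    simp only [innerB, List.mem_cons]
    by_cases hw : l[k] = 'w' <;> by_cases ht : l[k] = tg <;>
      simp [hw, ht] <;>
      first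
        | (split_ifs <;> omega)
        | (refine ⟨by cases w <;> simp [eq_comm], by split_ifs <;> omega⟩)
        | (cases w <;> simp [Ne.symm hw])
  · have hki : (l.length : Int) ≤ (k : Int) := by exact_mod_cast hk
    rw [PySem.List.pyRange_one_eq_nil hki, List.drop_eq_nil_of_le hk]
    simp [innerB]
termination_by l.length - k

lemma outer_bridge (l : List Char) (tg : Char) (k : Nat) (acc : Int) :
    (PySem.List.pyRange (k : Int) (l.length : Int) 1).foldl (outerStepA l tg) acc
    = acc + outerF tg (l.drop k) := by
  rcases Nat.lt_or_ge k l.length with hk | hk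
  · have hki : (k : Int) < (l.length : Int) := by exact_mod_cast hk
    have hcast : (k : Int) + 1 = ((k + 1 : Nat) : Int) := by push_cast; rfl
    have hget : PySem.List.pyGetD l (k : Int) ' ' = l[k] := by
      simp [PySem.List.pyGetD_natCast, List.getD_eq_getElem?_getD, List.getElem?_eq_getElem hk]
    have hdrop : l.drop k = l[k] :: l.drop (k + 1) := by
      rw [List.drop_eq_getElem_cons hk]
    rw [PySem.List.pyRange_one_cons hki, List.foldl_cons]
    simp only [outerStepA, hget]
    by_cases ht : l[k] = tg
    · rw [if_pos ⟨ht, by omega⟩, hcast]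
      simp only [inner_bridge]
      rw [outer_bridge l tg (k + 1), hdrop]
      simp [outerF, ht]
      omega
    · rw [if_neg (by simp [ht]), hcast]
      rw [outer_bridge l tg (k + 1), hdrop]
      simp [outerF, ht]
  · have hki : (l.length : Int) ≤ (k : Int) := by exact_mod_cast hk
    rw [PySem.List.pyRange_one_eq_nil hki, List.drop_eq_nil_of_le hk]
    simp [outerF]
termination_by l.length - k

lemma aLoop_eq (l : List Char) (tg : Char) (c : Int) : aLoop l tg c = c + outerF tg l := by
  have h := outer_bridge l tg 0 c
  simpa [aLoop] using h

lemma innerB_snoc (tg : Char) (c : Char) : ∀ (t : List Char) (w : Bool),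
    innerB tg w (t ++ [c])
    = innerB tg w t + (if (w = true ∨ 'w' ∈ t ∨ c = 'w') ∧ c = tg then 1 else 0)
  | [], w => by
    simp only [List.nil_append, innerB, List.not_mem_nil]
    by_cases hc : c = 'w' <;> by_cases ht : c = tg <;> cases w <;> simp [hc, ht]
  | x :: t, w => by
    simp only [List.cons_append, innerB, innerB_snoc tg c t, List.mem_cons]
    by_cases hx : x = 'w'
    · cases w <;> simp [hx] <;> split_ifs <;> omega
    · cases w <;> simp [hx, Ne.symm hx] <;> split_ifs <;> omega

lemma outerF_snoc (tg : Char) (htg : tg ≠ 'w') (c : Char) (l : List Char) :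
    outerF tg (l ++ [c]) = outerF tg l + (if c = tg then bw tg l else 0) := by
  induction l with
  | nil =>
    simp only [List.nil_append, outerF, innerB, bw]
    split_ifs <;> omega
  | cons x t ih =>
    simp only [List.cons_append, outerF, ih, innerB_snoc tg c t false, bw]
    by_cases hc : c = tg
    · by_cases hx : x = tg <;> by_cases hw : 'w' ∈ t <;>
        simp [hc, hx, hw, htg] <;> omega
    · simp [hc]

lemma bw_snoc (tg : Char) (c : Char) (l : List Char) :
    bw tg (l ++ [c]) = if c = 'w' then tcnt tg l else bw tg l := by
  induction l with
  | nil => simp [bw, tcnt]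
  | cons x t ih =>
    simp only [List.cons_append, bw, ih, tcnt, List.countP_cons]
    by_cases hc : c = 'w'
    · by_cases hx : x = tg <;> by_cases hw : 'w' ∈ t <;>
        simp [hc, hx, hw] <;> omega
    · have hc' : ¬('w' = c) := fun h => hc h.symm
      by_cases hx : x = tg <;> by_cases hw : 'w' ∈ t <;>
        simp [hc, hc', hx, hw]

lemma tcnt_snoc (tg c : Char) (l : List Char) :
    tcnt tg (l ++ [c]) = tcnt tg l + (if c = tg then 1 else 0) := by
  simp [tcnt, List.countP_append, List.countP_cons]

lemma B_state (l : List Char) :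
    l.foldl stepB (0, 0, 0, 0, 0)
    = (tcnt 'o' l, tcnt 'u' l, bw 'o' l, bw 'u' l, outerF 'o' l + outerF 'u' l) := by
  induction l using List.reverseRecOn with
  | nil => simp [tcnt, bw, outerF]
  | append_singleton t c ih =>
    rw [List.foldl_append, List.foldl_cons, List.foldl_nil, ih]
    rw [tcnt_snoc, tcnt_snoc, bw_snoc 'o' c t, bw_snoc 'u' c t,
        outerF_snoc 'o' (by decide) c t, outerF_snoc 'u' (by decide) c t]
    by_cases hw : c = 'w' <;> by_cases ho : c = 'o' <;> by_cases hu : c = 'u' <;>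
      simp_all [stepB] <;> omega

-- ===== VERDICT (by name: the statement is the Claim_ definition above) =====
theorem solve_spec : Claim_equal_solve := by
  intro S _
  show solve S = solve_alt S
  simp [solve, solve_alt, aLoop_eq, B_state]
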